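-- pv_equiv track=rewrite | github.com/samayunPathan/leetcode-programming-practise | 922_sort_array_parity2.py | sort_array_2
-- ===== SOURCE A (Python) =====
-- def sort_array_2(nums):
--     res=[None]*len(nums);e=0;o=1
--     for i in nums:
--         if i%2==0:
--             res[e]=i
--             e+=2
--         else:
--             res[o]=i
--             o+=2
--     return res
-- ===== SOURCE B (Python) =====
-- def sort_array_2(nums):
--     evens = [x for x in nums if x % 2 == 0]
--     odds = [x for x in nums if x % 2 != 0]
--     res = [None] * len(nums)
--     for i, x in enumerate(evens):
--         res[2 * i] = x
--     for i, x in enumerate(odds):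
--         res[2 * i + 1] = x
--     return res
-- ===== Notes on version B (the rewrite author's own statement) =====
-- stated objective: alternative
-- what changed: Replaces A's single interleaved pass with two running write cursors by a partition into evens/odds comprehensions followed by two indexed placement loops (evens at 2i, odds at 2i+1).
import Mathlib
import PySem

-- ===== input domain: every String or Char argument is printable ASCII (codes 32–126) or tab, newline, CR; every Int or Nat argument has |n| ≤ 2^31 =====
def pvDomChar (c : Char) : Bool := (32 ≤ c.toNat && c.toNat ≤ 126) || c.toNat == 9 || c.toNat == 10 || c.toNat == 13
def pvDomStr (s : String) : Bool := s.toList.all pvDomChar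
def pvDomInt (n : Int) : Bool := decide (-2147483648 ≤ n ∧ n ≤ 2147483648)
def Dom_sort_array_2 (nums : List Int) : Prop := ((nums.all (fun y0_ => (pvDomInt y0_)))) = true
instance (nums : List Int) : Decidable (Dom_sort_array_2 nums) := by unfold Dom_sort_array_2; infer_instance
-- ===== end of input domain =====

-- B replaces A's single interleaved pass with two running write cursors by a partition into
-- evens/odds followed by two indexed placement loops (objective: alternative).

-- ===== PORT A =====
-- res is a List (Option Int) (Python's [None]*n); res[e]=i is List.set (in range under Pre_;
-- where Python A raises IndexError — outside Pre_ — the write is dropped, nothing is claimed).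
def sortA_loop : List Int → List (Option Int) → Nat → Nat → List (Option Int)
  | [], res, _, _ => res
  | i :: t, res, e, o =>
    if PySem.Int.mod i 2 = 0 then sortA_loop t (res.set e (some i)) (e + 2) o
    else sortA_loop t (res.set o (some i)) e (o + 2)

def sort_array_2 (nums : List Int) : List Int :=
  -- under Pre_ every slot is written, so the final unOption (getD 0) is the identity shim
  (sortA_loop nums (List.replicate nums.length none) 0 1).map (fun x => x.getD 0)

-- ===== PORT B =====
-- 'for i, x in enumerate(xs): res[2*i + off] = x' (off = 0 for evens, 1 for odds); same
-- List.set convention for res[·]=· as in port A (out-of-range = IndexError, outside Pre_)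
def placeAt (off : Nat) : List (Option Int) → List Int → Nat → List (Option Int)
  | res, [], _ => res
  | res, x :: xs, i => placeAt off (res.set (2 * i + off) (some x)) xs (i + 1)

def sort_array_2_alt (nums : List Int) : List Int :=
  let evens := nums.filter (fun x => PySem.Int.mod x 2 = 0)
  let odds  := nums.filter (fun x => ¬ PySem.Int.mod x 2 = 0)
  (placeAt 1 (placeAt 0 (List.replicate nums.length none) evens 0) odds 0).map
    (fun x => x.getD 0)

-- ===== PRECONDITION & SPEC =====
-- Pre_ excludes exactly the inputs on which both Pythons raise IndexError: a write index runs
-- past the end unless the number of evens is exactly ⌈n/2⌉ (then both fill every slot).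
def Pre_sort_array_2 (nums : List Int) : Prop :=
  2 * (nums.filter (fun x => PySem.Int.mod x 2 = 0)).length = nums.length ∨
  2 * (nums.filter (fun x => PySem.Int.mod x 2 = 0)).length = nums.length + 1
instance (nums : List Int) : Decidable (Pre_sort_array_2 nums) := by
  unfold Pre_sort_array_2; infer_instance

def pvWitness_sort_array_2 : List Int := [3, 0, -2, 7, 1, 4]

def Spec_sort_array_2 (nums : List Int) (out : List Int) : Prop := out = sort_array_2_alt nums
instance (nums : List Int) (out : List Int) : Decidable (Spec_sort_array_2 nums out) := by
  unfold Spec_sort_array_2; infer_instance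

-- ===== CLAIM (what is proved, stated in full; the proofs are below) =====
def Claim_equal_sort_array_2 : Prop := ∀ (nums : List Int), Dom_sort_array_2 nums →
  Pre_sort_array_2 nums → Spec_sort_array_2 nums (sort_array_2 nums)

-- ===== LEMMAS AND PROOFS =====

-- proof-side view of one placement cursor: write xs at positions s, s+2, s+4, …
def place (res : List (Option Int)) : List Int → Nat → List (Option Int)
  | [], _ => res
  | x :: xs, s => place (res.set s (some x)) xs (s + 2)

theorem placeAt_eq_place (off : Nat) (xs : List Int) (res : List (Option Int)) (i : Nat) :
    placeAt off res xs i = place res xs (2 * i + off) := by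
  induction xs generalizing res i with
  | nil => rfl
  | cons x xs ih =>
    simp only [placeAt, place, ih]
    congr 1
    omega

theorem place_set_comm (xs : List Int) (res : List (Option Int)) (s j : Nat) (v : Option Int)
    (h : j % 2 ≠ s % 2) :
    place (res.set j v) xs s = (place res xs s).set j v := by
  induction xs generalizing res s with
  | nil => rfl
  | cons x xs ih =>
    simp only [place]
    rw [List.set_comm _ _ (show j ≠ s by omega), ih _ _ (by omega)]

-- A's interleaved loop is the even cursor's writes followed by the odd cursor's writes:
-- the two cursors keep opposite parities, so their writes never touch the same slot
theorem sortA_loop_eq_place (nums : List Int) (res : List (Option Int)) (e o : Nat)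
    (he : e % 2 = 0) (ho : o % 2 = 1) :
    sortA_loop nums res e o =
      place (place res (nums.filter (fun x => PySem.Int.mod x 2 = 0)) e)
        (nums.filter (fun x => ¬ PySem.Int.mod x 2 = 0)) o := by
  induction nums generalizing res e o with
  | nil => rfl
  | cons i t ih =>
    simp only [sortA_loop]
    by_cases hi : PySem.Int.mod i 2 = 0
    · rw [if_pos hi, ih _ _ _ (by omega) ho]
      have h1 : (i :: t).filter (fun x => PySem.Int.mod x 2 = 0)
          = i :: t.filter (fun x => PySem.Int.mod x 2 = 0) := by
        simp only [List.filter_cons]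
        rw [if_pos (decide_eq_true hi)]
      have h2 : (i :: t).filter (fun x => ¬ PySem.Int.mod x 2 = 0)
          = t.filter (fun x => ¬ PySem.Int.mod x 2 = 0) := by
        simp only [List.filter_cons]
        rw [if_neg (fun hc => (of_decide_eq_true hc) hi)]
      rw [h1, h2]
      rfl
    · rw [if_neg hi, ih _ _ _ he (by omega)]
      have h1 : (i :: t).filter (fun x => PySem.Int.mod x 2 = 0)
          = t.filter (fun x => PySem.Int.mod x 2 = 0) := by
        simp only [List.filter_cons]
        rw [if_neg (fun hc => hi (of_decide_eq_true hc))]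
      have h2 : (i :: t).filter (fun x => ¬ PySem.Int.mod x 2 = 0)
          = i :: t.filter (fun x => ¬ PySem.Int.mod x 2 = 0) := by
        simp only [List.filter_cons]
        rw [if_pos (decide_eq_true hi)]
      rw [h1, h2]
      conv_rhs => simp only [place]
      rw [place_set_comm _ _ _ _ _ (show o % 2 ≠ e % 2 by omega)]

-- ===== VERDICT (by name: the statement is the Claim_ definition above) =====
theorem sort_array_2_spec : Claim_equal_sort_array_2 := by
  intro nums _ _
  unfold Spec_sort_array_2 sort_array_2 sort_array_2_alt
  rw [sortA_loop_eq_place nums _ 0 1 (by omega) (by omega)]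
  simp only [placeAt_eq_place]
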